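-- pv_equiv track=rewrite | github.com/henriquelmeeee/mundolinux | v1.0/algorithm.py | is_alphanum
-- ===== SOURCE A (Python) =====
-- def is_alphanum(text : str):
--     letters = [
--         'a', 'b', 'c', 'd', 'e', 'f', 'g', 'h', 'i', 'j', 'k', 'l', 'm', 'n', 'o', 'p', 'q', 'r', 's', 't',
--         'u', 'v', 'w', 'x', 'y', 'z'
--     ]
--     for letter in text.lower():
--         if not letter in letters:
--             return False
--     return True
-- ===== SOURCE B (Python) =====
-- def is_alphanum(text: str):
--     # Delete every ASCII letter (both cases) via a translation table,
--     # then the text was all-letters iff nothing is left.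
--     drop = dict.fromkeys(range(65, 91))
--     drop.update(dict.fromkeys(range(97, 123)))
--     return text.translate(drop) == ''
-- ===== Notes on version B (the rewrite author's own statement) =====
-- stated objective: faster
-- what changed: Instead of looping over lower(text) with an early return on a list-membership miss, B never lowercases: it deletes all ASCII letters (both cases) with a str.translate table and tests whether the residue is empty; the per-character work moves into C-level str.translate.
import Mathlib
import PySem

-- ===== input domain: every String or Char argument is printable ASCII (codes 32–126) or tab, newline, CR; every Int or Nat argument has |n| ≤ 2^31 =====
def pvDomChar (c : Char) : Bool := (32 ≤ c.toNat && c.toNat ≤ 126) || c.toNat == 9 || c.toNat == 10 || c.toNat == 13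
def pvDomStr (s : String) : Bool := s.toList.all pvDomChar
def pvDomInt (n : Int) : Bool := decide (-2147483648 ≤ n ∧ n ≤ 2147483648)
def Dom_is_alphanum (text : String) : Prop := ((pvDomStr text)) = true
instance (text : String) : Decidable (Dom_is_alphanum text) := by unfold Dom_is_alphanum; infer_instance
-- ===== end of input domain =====

-- B replaces A's lowercase-then-loop-with-early-return by deleting all ASCII letters
-- (both cases) with a str.translate table and testing the residue for emptiness.


-- ===== PORT A =====
def pvLettersA : List Char :=
  ['a', 'b', 'c', 'd', 'e', 'f', 'g', 'h', 'i', 'j', 'k', 'l', 'm', 'n', 'o', 'p', 'q', 'r', 's', 't',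
   'u', 'v', 'w', 'x', 'y', 'z']

-- the for-loop with early 'return False'
def pvLoopA : List Char → Bool
  | [] => true
  | c :: rest => if !(pvLettersA.contains c) then false else pvLoopA rest

def is_alphanum (text : String) : Bool :=
  pvLoopA (PySem.Str.lower text).toList

-- ===== PORT B =====
-- keys of B's translation table (the ordinals str.translate deletes): range(65,91) ++ range(97,123)
def pvDropKeys : List Nat := (List.range' 65 26) ++ (List.range' 97 26)

-- str.translate with a delete-only table keeps exactly the chars whose ordinal is not a key;
-- B then compares the residue with the empty string
def is_alphanum_alt (text : String) : Bool :=
  (text.toList.filter (fun c => !(pvDropKeys.contains c.toNat))) == []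

-- ===== PRECONDITION & SPEC =====
def Spec_is_alphanum (text : String) (out : Bool) : Prop := out = is_alphanum_alt text
instance (text : String) (out : Bool) : Decidable (Spec_is_alphanum text out) := by unfold Spec_is_alphanum; infer_instance

-- ===== CLAIM (what is proved, stated in full; the proofs are below) =====
def Claim_equal_is_alphanum : Prop := ∀ (text : String), Dom_is_alphanum text → Spec_is_alphanum text (is_alphanum text)

-- ===== LEMMAS AND PROOFS =====
theorem pvLoopA_eq_all (l : List Char) :
    pvLoopA l = l.all (fun c => pvLettersA.contains c) := by
  induction l with
  | nil => rfl
  | cons c rest ih =>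
    simp only [pvLoopA, List.all_cons, ih]
    cases pvLettersA.contains c <;> simp

theorem pvToNat_ofNat_small (n : Nat) (h : n ≤ 1000) : (Char.ofNat n).toNat = n := by
  rw [Char.toNat_ofNat, if_pos (Or.inl (by omega))]

theorem pvLettersA_eq : pvLettersA = (List.range' 97 26).map Char.ofNat := by decide

theorem pvMem_letters (c : Char) : c ∈ pvLettersA ↔ (97 ≤ c.toNat ∧ c.toNat ≤ 122) := by
  rw [pvLettersA_eq, List.mem_map]
  constructor
  · rintro ⟨m, hm, rfl⟩
    rw [List.mem_range'_1] at hm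
    rw [pvToNat_ofNat_small m (by omega)]
    omega
  · rintro ⟨h1, h2⟩
    exact ⟨c.toNat, by rw [List.mem_range'_1]; omega, Char.ofNat_toNat c⟩

theorem pvMem_drop (n : Nat) :
    n ∈ pvDropKeys ↔ ((65 ≤ n ∧ n ≤ 90) ∨ (97 ≤ n ∧ n ≤ 122)) := by
  simp only [pvDropKeys, List.mem_append, List.mem_range'_1]
  omega

-- per character: the lowered char is one of A's letters iff the char's ordinal is a table key of B
theorem pvChar_agree (c : Char) :
    pvLettersA.contains (PySem.Chars.lowerChar c) = pvDropKeys.contains c.toNat := by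
  rw [List.contains_eq_mem, List.contains_eq_mem, decide_eq_decide]
  unfold PySem.Chars.lowerChar PySem.Chars.isupper
  split_ifs with h
  · simp only [Bool.and_eq_true, decide_eq_true_eq] at h
    have h' : 65 ≤ c.toNat ∧ c.toNat ≤ 90 := h
    rw [pvMem_letters, pvMem_drop, pvToNat_ofNat_small _ (by omega)]
    omega
  · simp only [Bool.and_eq_true, decide_eq_true_eq] at h
    have h' : ¬(65 ≤ c.toNat ∧ c.toNat ≤ 90) := h
    rw [pvMem_letters, pvMem_drop]
    omega

-- ===== VERDICT (by name: the statement is the Claim_ definition above) =====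
theorem is_alphanum_spec : Claim_equal_is_alphanum := by
  intro text _
  unfold Spec_is_alphanum is_alphanum is_alphanum_alt
  rw [pvLoopA_eq_all, PySem.Str.toList_lower]
  induction text.toList with
  | nil => decide
  | cons c rest ih =>
    simp only [PySem.Chars.lower, List.map_cons, List.all_cons, List.filter_cons, pvChar_agree]
    cases h : pvDropKeys.contains c.toNat <;> simp_all [PySem.Chars.lower]
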